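-- pv_equiv track=rewrite | github.com/grapheneaffiliate/h4-polytopic-attention | solve_arc_b16.py | solve_a65b410d
-- ===== SOURCE A (Python) =====
-- def solve_a65b410d(grid):
--     rows = len(grid)
--     cols = len(grid[0])
--     out = [[0]*cols for _ in range(rows)]
--
--     two_row = -1
--     two_len = 0
--     for r in range(rows):
--         count = sum(1 for c in range(cols) if grid[r][c] == 2)
--         if count > 0:
--             two_row = r
--             two_len = count
--             break
--
--     for c in range(two_len):
--         out[two_row][c] = 2
--
--     for d in range(1, two_row + 1):
--         length = two_len + d
--         for c in range(min(length, cols)):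
--             out[two_row - d][c] = 3
--
--     for d in range(1, rows - two_row):
--         length = two_len - d
--         if length <= 0:
--             break
--         for c in range(length):
--             out[two_row + d][c] = 1
--
--     return out
-- ===== SOURCE B (Python) =====
-- def solve_a65b410d(grid):
--     cols = len(grid[0])
--     two_row, two_len = -1, 0
--     for r, row in enumerate(grid):
--         n = row[:cols].count(2)
--         if n:
--             two_row, two_len = r, n
--             break
--     out = []
--     for r in range(len(grid)):
--         d = two_row - r
--         length = min(max(two_len + d, 0), cols)
--         v = 3 if d > 0 else 2 if d == 0 else 1
--         out.append([v] * length + [0] * (cols - length))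
--     return out
-- ===== Notes on version B (the rewrite author's own statement) =====
-- stated objective: simpler
-- what changed: The three separate fill loops (2-row, upward 3s, downward 1s with a break) are replaced by one pass that builds each output row directly from its signed distance to the 2-row via a single clamped-length formula.
import Mathlib
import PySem

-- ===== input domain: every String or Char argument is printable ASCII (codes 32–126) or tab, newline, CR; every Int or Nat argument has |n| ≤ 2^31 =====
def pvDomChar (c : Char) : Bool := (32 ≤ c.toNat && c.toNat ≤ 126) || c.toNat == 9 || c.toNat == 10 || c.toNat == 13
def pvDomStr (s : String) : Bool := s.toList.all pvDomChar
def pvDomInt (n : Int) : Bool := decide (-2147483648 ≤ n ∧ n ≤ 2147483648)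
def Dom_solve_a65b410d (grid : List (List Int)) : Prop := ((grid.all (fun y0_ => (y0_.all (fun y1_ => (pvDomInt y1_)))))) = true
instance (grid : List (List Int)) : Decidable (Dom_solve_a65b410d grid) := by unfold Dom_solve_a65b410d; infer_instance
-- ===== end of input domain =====

-- B replaces A's three fill loops with one distance-driven pass building each row directly; objective: simpler.

-- ===== PORT A =====

-- count = sum(1 for c in range(cols) if grid[r][c] == 2)
def pvCountA (grid : List (List Int)) (cols r : Int) : Int :=
  (PySem.List.pyRange 0 cols 1).foldl
    (fun acc c => if PySem.List.pyGetD (PySem.List.pyGetD grid r []) c 0 = 2 then acc + 1 else acc) 0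

-- the scan loop with its break
def pvScanA (grid : List (List Int)) (cols : Int) : List Int → Int × Int
  | [] => (-1, 0)
  | r :: rest =>
    let count := pvCountA grid cols r
    if count > 0 then (r, count) else pvScanA grid cols rest

-- 'for c in cs: out[r][c] = v'
def pvFill (r v : Int) (out : List (List Int)) (cs : List Int) : List (List Int) :=
  cs.foldl (fun o c => PySem.List.pySetD o r (PySem.List.pySetD (PySem.List.pyGetD o r []) c v)) out

-- the downward loop with its break
def pvLoop3 (two_row two_len : Int) : List Int → List (List Int) → List (List Int)
  | [], o => o
  | d :: rest, o =>
    if two_len - d ≤ 0 then o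
    else pvLoop3 two_row two_len rest (pvFill (two_row + d) 1 o (PySem.List.pyRange 0 (two_len - d) 1))

def solve_a65b410d (grid : List (List Int)) : List (List Int) :=
  let rows : Int := grid.length
  let cols : Int := (PySem.List.pyGetD grid 0 []).length
  let out : List (List Int) := List.replicate grid.length (List.replicate (PySem.List.pyGetD grid 0 []).length 0)
  let p := pvScanA grid cols (PySem.List.pyRange 0 rows 1)
  let two_row := p.1
  let two_len := p.2
  let out := pvFill two_row 2 out (PySem.List.pyRange 0 two_len 1)
  let out := (PySem.List.pyRange 1 (two_row + 1) 1).foldl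
    (fun o d => pvFill (two_row - d) 3 o (PySem.List.pyRange 0 (min (two_len + d) cols) 1)) out
  pvLoop3 two_row two_len (PySem.List.pyRange 1 (rows - two_row) 1) out

-- ===== PORT B =====

-- first row with a 2 among its first cols cells, and that count of 2s
def pvScanB : Int → List (List Int) → Int → Int × Int
  | _, [], _ => (-1, 0)
  | cols, row :: rest, r =>
    let n : Int := PySem.List.count (PySem.List.slice row none (some cols)) 2
    if n > 0 then (r, n) else pvScanB cols rest (r + 1)

def solve_a65b410d_alt (grid : List (List Int)) : List (List Int) :=
  let cols : Int := (PySem.List.pyGetD grid 0 []).length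
  let p := pvScanB cols grid 0
  let two_row := p.1
  let two_len := p.2
  (PySem.List.pyRange 0 grid.length 1).map (fun r =>
    let d := two_row - r
    let len := min (max (two_len + d) 0) cols
    let v : Int := if d > 0 then 3 else if d = 0 then 2 else 1
    List.replicate len.toNat v ++ List.replicate (cols - len).toNat 0)

-- ===== PRECONDITION & SPEC =====
-- Pre_ excludes exactly the inputs on which A raises IndexError: the empty grid, and grids
-- where some row scanned before (and including) the first row with a 2 in its first
-- len(grid[0]) cells is shorter than len(grid[0]).
def Pre_solve_a65b410d (grid : List (List Int)) : Prop :=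
  grid ≠ [] ∧ ∀ r (_ : r < grid.length),
    (∀ j (_ : j < r), (2 : Int) ∉ grid[j].take (grid.headD []).length) →
    (grid.headD []).length ≤ grid[r].length
instance (grid : List (List Int)) : Decidable (Pre_solve_a65b410d grid) := by
  unfold Pre_solve_a65b410d; infer_instance

def pvWitness_solve_a65b410d : List (List Int) := [[0, 0, 0], [2, 2, 0], [0, 0, 0]]

def Spec_solve_a65b410d (grid : List (List Int)) (out : List (List Int)) : Prop := out = solve_a65b410d_alt grid
instance (grid : List (List Int)) (out : List (List Int)) : Decidable (Spec_solve_a65b410d grid out) := by unfold Spec_solve_a65b410d; infer_instance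

-- ===== CLAIM (what is proved, stated in full; the proofs are below) =====
def Claim_equal_solve_a65b410d : Prop := ∀ (grid : List (List Int)), Dom_solve_a65b410d grid → Pre_solve_a65b410d grid → Spec_solve_a65b410d grid (solve_a65b410d grid)

-- ===== LEMMAS AND PROOFS =====

-- fillRow: fold of pySetD over range 0..L fills a prefix
theorem fillRow_eq (v : Int) (row : List Int) (L : Nat) (h : L ≤ row.length) :
    (PySem.List.pyRange 0 (L : Int) 1).foldl (fun r c => PySem.List.pySetD r c v) row
      = List.replicate L v ++ row.drop L := by
  induction L with
  | zero => simp [PySem.List.pyRange_one_eq_nil]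
  | succ n ih =>
    have hn : n ≤ row.length := Nat.le_of_succ_le h
    have hcast : ((n + 1 : Nat) : Int) = (n : Int) + 1 := by push_cast; ring
    rw [hcast, PySem.List.pyRange_one_succ_right (by positivity), List.foldl_append, ih hn]
    have hlt : n < row.length := h
    simp only [List.foldl_cons, List.foldl_nil, PySem.List.pySetD_natCast]
    rw [List.set_append, List.drop_eq_getElem_cons hlt]
    simp only [List.length_replicate, lt_irrefl, if_false, Nat.sub_self, List.set_cons_zero]
    simp [List.replicate_succ', List.drop_eq_getElem_cons hlt]

-- pvFill acts on one row
theorem pvFill_eq (r : Nat) (v : Int) (cs : List Int) :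
    ∀ (o : List (List Int)), r < o.length →
    pvFill (r : Int) v o cs
      = o.set r (cs.foldl (fun row c => PySem.List.pySetD row c v) (o.getD r [])) := by
  induction cs with
  | nil =>
    intro o h
    rw [List.getD_eq_getElem _ _ h]
    simp [pvFill, List.set_getElem_self h]
  | cons c cs ih =>
    intro o h
    have h1 : PySem.List.pyGetD o (r : Int) [] = o.getD r [] := PySem.List.pyGetD_natCast o r []
    have hstep : PySem.List.pySetD o (r : Int) (PySem.List.pySetD (PySem.List.pyGetD o (r:Int) []) c v)
        = o.set r (PySem.List.pySetD (o.getD r []) c v) := by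
      rw [h1, PySem.List.pySetD_natCast]
    simp only [pvFill, List.foldl_cons] at ih ⊢
    rw [hstep]
    have h2 : r < (o.set r (PySem.List.pySetD (o.getD r []) c v)).length := by simpa using h
    rw [ih _ h2]
    rw [List.set_set]
    congr 1
    rw [List.getD_eq_getElem _ _ h2, List.getElem_set_self, List.getD_eq_getElem _ _ h]

-- count over a cols-range equals List.count on a prefix
theorem countA_take (row : List Int) : ∀ (k : Nat), k ≤ row.length →
    (PySem.List.pyRange 0 (k : Int) 1).foldl
      (fun acc c => if PySem.List.pyGetD row c 0 = 2 then acc + 1 else acc) 0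
    = ((row.take k).count 2 : Int) := by
  intro k
  induction k with
  | zero => intro _; simp [PySem.List.pyRange_one_eq_nil]
  | succ n ih =>
    intro h
    have hn : n ≤ row.length := Nat.le_of_succ_le h
    have hlt : n < row.length := h
    have hcast : ((n + 1 : Nat) : Int) = (n : Int) + 1 := by push_cast; ring
    rw [hcast, PySem.List.pyRange_one_succ_right (by positivity), List.foldl_append, ih hn]
    simp only [List.foldl_cons, List.foldl_nil]
    rw [PySem.List.pyGetD_natCast, List.getD_eq_getElem _ _ hlt, List.take_succ]
    rw [List.getElem?_eq_getElem hlt]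
    simp only [Option.toList_some, List.count_append]
    by_cases h2 : row[n] = 2
    · simp [h2]
    · simp [h2]

-- pvScanB: either no row has a 2, or it returns the first such row and its count
theorem scanB_spec (m : Nat) : ∀ (t : List (List Int)) (r₀ : Int),
    (pvScanB (m : Int) t r₀ = (-1, 0) ∧ ∀ row ∈ t, List.count 2 (row.take m) = 0) ∨
    (∃ k : Nat, ∃ hk : k < t.length,
      pvScanB (m : Int) t r₀ = (r₀ + (k : Int), (List.count 2 (t[k].take m) : Int)) ∧
      0 < List.count 2 (t[k].take m) ∧ ∀ j (hj : j < k), List.count 2 (t[j].take m) = 0) := by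
  intro t
  induction t with
  | nil => intro r₀; left; simp [pvScanB]
  | cons row rest ih =>
    intro r₀
    by_cases hpos : 0 < List.count 2 (row.take m)
    · right
      refine ⟨0, by simp, ?_, by simpa using hpos, by omega⟩
      have hmem : (2 : Int) ∈ row.take m := List.count_pos_iff.mp hpos
      simp [pvScanB, PySem.List.count_eq, PySem.List.slice_to_natCast, hmem]
    · have hz : List.count 2 (row.take m) = 0 := by omega
      have hstep : pvScanB (m : Int) (row :: rest) r₀ = pvScanB (m : Int) rest (r₀ + 1) := by
        simp [pvScanB, PySem.List.count_eq, PySem.List.slice_to_natCast, hz]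
      rcases ih (r₀ + 1) with ⟨he, hall⟩ | ⟨k, hk, he, hc, hfirst⟩
      · left
        constructor
        · rw [hstep, he]
        · intro r hr
          rcases List.mem_cons.mp hr with h | h
          · simpa [h] using hz
          · exact hall r h
      · right
        refine ⟨k + 1, by simpa using Nat.succ_lt_succ hk, ?_, ?_, ?_⟩
        · rw [hstep, he]
          simp only [List.getElem_cons_succ, Prod.mk.injEq]
          refine ⟨by push_cast; ring, trivial⟩
        · simpa using hc
        · intro j hj
          cases j with
          | zero => simpa using hz
          | succ j => simpa using hfirst j (by omega)

-- pvScanA over the full range equals pvScanB, on grids where every row scanned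
-- before the break is at least cols long
theorem scanA_eq (grid : List (List Int)) (m : Nat)
    (hpre : ∀ r (hr : r < grid.length),
      (∀ j (hj : j < r), (2 : Int) ∉ grid[j].take m) → m ≤ grid[r].length) :
    ∀ (j k : Nat), grid.length - k = j → k ≤ grid.length →
    (∀ j' (hj : j' < k) (hj2 : j' < grid.length), (2 : Int) ∉ grid[j'].take m) →
    pvScanA grid (m : Int) (PySem.List.pyRange (k : Int) (grid.length : Int) 1)
      = pvScanB (m : Int) (grid.drop k) (k : Int) := by
  intro j
  induction j with
  | zero =>
    intro k hj hk _
    have hke : k = grid.length := by omega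
    subst hke
    rw [PySem.List.pyRange_one_eq_nil (by omega), List.drop_length]
    simp [pvScanA, pvScanB]
  | succ n ih =>
    intro k hj hk hinv
    have hklt : k < grid.length := by omega
    rw [PySem.List.pyRange_one_cons (by exact_mod_cast hklt)]
    rw [List.drop_eq_getElem_cons hklt]
    have hrow : PySem.List.pyGetD grid (k : Int) [] = grid[k] := by
      rw [PySem.List.pyGetD_natCast, List.getD_eq_getElem _ _ hklt]
    have hmlen : m ≤ grid[k].length := hpre k hklt (fun j hj => hinv j hj (by omega))
    have hcount : pvCountA grid (m : Int) (k : Int)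
        = (List.count 2 (grid[k].take m) : Int) := by
      rw [pvCountA, hrow, countA_take grid[k] m hmlen]
    show pvScanA grid (m : Int) ((k : Int) :: PySem.List.pyRange ((k : Int) + 1) (grid.length : Int) 1) = _
    rw [pvScanA, pvScanB]
    simp only [hcount, PySem.List.count_eq, PySem.List.slice_to_natCast]
    by_cases hpos : (0 : Int) < (List.count 2 (grid[k].take m) : Int)
    · simp only [if_pos hpos]
    · simp only [if_neg hpos]
      have hz : (2 : Int) ∉ grid[k].take m := by
        rw [← List.count_eq_zero]
        omega
      have hcast : ((k : Int) + 1) = ((k + 1 : Nat) : Int) := by push_cast; ring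
      rw [hcast, ih (k + 1) (by omega) (by omega) (by
        intro j' hj' hj2
        rcases Nat.lt_succ_iff_lt_or_eq.mp hj' with h | h
        · exact hinv j' h hj2
        · subst h; exact hz)]

-- pvLoop3 with its break is the fold over the truncated range
theorem loop3_eq (tr tl : Int) : ∀ (j : Nat) (a : Int) (b : Int) (o : List (List Int)),
    (b - a).toNat = j →
    pvLoop3 tr tl (PySem.List.pyRange a b 1) o
      = (PySem.List.pyRange a (min b tl) 1).foldl
          (fun o d => pvFill (tr + d) 1 o (PySem.List.pyRange 0 (tl - d) 1)) o := by
  intro j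
  induction j with
  | zero =>
    intro a b o hj
    have hba : b ≤ a := by omega
    rw [PySem.List.pyRange_one_eq_nil hba, PySem.List.pyRange_one_eq_nil (by omega)]
    rfl
  | succ n ih =>
    intro a b o hj
    have hab : a < b := by omega
    rw [PySem.List.pyRange_one_cons hab]
    by_cases hbreak : tl - a ≤ 0
    · rw [pvLoop3, if_pos hbreak, PySem.List.pyRange_one_eq_nil (by omega)]
      rfl
    · rw [pvLoop3, if_neg hbreak, ih (a + 1) b _ (by omega),
        show PySem.List.pyRange a (min b tl) = a :: PySem.List.pyRange (a + 1) (min b tl) from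
          PySem.List.pyRange_one_cons (by omega),
        List.foldl_cons]

-- a fold of pvFill-writes at pairwise-distinct rows that all start as zero rows
theorem fold_write (v : Int) (m : Nat) (f len : Int → Int) :
    ∀ (ds : List Int) (o : List (List Int)),
    (∀ d ∈ ds, 0 ≤ f d ∧ f d < (o.length : Int) ∧ 0 ≤ len d ∧ len d ≤ (m : Int) ∧
       o[(f d).toNat]? = some (List.replicate m 0)) →
    ds.Pairwise (fun a b => f a ≠ f b) →
    ((ds.foldl (fun o d => pvFill (f d) v o (PySem.List.pyRange 0 (len d) 1)) o).length = o.length) ∧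
    (∀ i : Nat, (∀ d ∈ ds, f d ≠ (i : Int)) →
      (ds.foldl (fun o d => pvFill (f d) v o (PySem.List.pyRange 0 (len d) 1)) o)[i]? = o[i]?) ∧
    (∀ d ∈ ds,
      (ds.foldl (fun o d => pvFill (f d) v o (PySem.List.pyRange 0 (len d) 1)) o)[(f d).toNat]?
        = some (List.replicate (len d).toNat v ++ List.replicate (m - (len d).toNat) 0)) := by
  intro ds
  induction ds with
  | nil => intro o _ _; exact ⟨rfl, fun i _ => rfl, by simp⟩
  | cons d₀ ds ih =>
    intro o hds hp
    obtain ⟨hf0, hflt, hl0, hlm, hbase⟩ := hds d₀ (List.mem_cons_self)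
    rw [List.pairwise_cons] at hp
    obtain ⟨hph, hpt⟩ := hp
    have hr : ((f d₀).toNat : Int) = f d₀ := Int.toNat_of_nonneg hf0
    have hL : ((len d₀).toNat : Int) = len d₀ := Int.toNat_of_nonneg hl0
    have hrlt : (f d₀).toNat < o.length := by omega
    have hgetD : o.getD (f d₀).toNat [] = List.replicate m 0 := by
      rw [List.getD_eq_getElem?_getD, hbase]; rfl
    have hstep := pvFill_eq (f d₀).toNat v (PySem.List.pyRange 0 (len d₀) 1) o hrlt
    rw [hr, hgetD, ← hL,
      fillRow_eq v (List.replicate m 0) (len d₀).toNat (by simp; omega),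
      List.drop_replicate, hL] at hstep
    simp only [List.foldl_cons, hstep]
    set o' := o.set (f d₀).toNat
        (List.replicate (len d₀).toNat v ++ List.replicate (m - (len d₀).toNat) 0) with ho'
    have hlen' : o'.length = o.length := by rw [ho', List.length_set]
    have hkeep : ∀ d ∈ ds, o'[(f d).toNat]? = o[(f d).toNat]? := by
      intro d hd
      have hne : f d₀ ≠ f d := hph d hd
      have h0d : 0 ≤ f d := (hds d (List.mem_cons_of_mem _ hd)).1
      exact List.getElem?_set_ne (by omega)
    have ihr := ih o' (by
      intro d hd
      obtain ⟨a, b, c, e, g⟩ := hds d (List.mem_cons_of_mem _ hd)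
      exact ⟨a, by rwa [hlen'], c, e, by rw [hkeep d hd]; exact g⟩) hpt
    refine ⟨by rw [ihr.1, hlen'], ?_, ?_⟩
    · intro i hi
      rw [ihr.2.1 i (fun d hd => hi d (List.mem_cons_of_mem _ hd))]
      have : f d₀ ≠ (i : Int) := hi d₀ List.mem_cons_self
      exact List.getElem?_set_ne (by omega)
    · intro d hd
      rcases List.mem_cons.mp hd with rfl | hd'
      · rw [ihr.2.1 (f d).toNat (by intro d' hd'; rw [hr]; exact (hph d' hd').symm)]
        exact List.getElem?_set_self (by omega)
      · exact ihr.2.2 d hd'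

-- bridge between a concrete written row and B's clamped-formula row
theorem row_build (m : Nat) (y v w : Int) (X : Nat)
    (hX : (X : Int) = min (max y 0) (m : Int)) (hw : w = v) :
    (some (List.replicate X w ++ List.replicate (m - X) 0) : Option (List Int))
      = some (List.replicate (min (max y 0) (m : Int)).toNat v
          ++ List.replicate ((m : Int) - min (max y 0) (m : Int)).toNat 0) := by
  subst hw
  have h1 : (min (max y 0) (m : Int)).toNat = X := by omega
  have h2 : ((m : Int) - min (max y 0) (m : Int)).toNat = m - X := by omega
  rw [h1, h2]

theorem AB_eq (grid : List (List Int))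
    (hne : grid ≠ [])
    (hpre0 : ∀ r (hr : r < grid.length),
      (∀ j (hj : j < r), (2 : Int) ∉ grid[j].take (grid.headD []).length) →
      (grid.headD []).length ≤ grid[r].length) :
    solve_a65b410d grid = solve_a65b410d_alt grid := by
  cases grid with
  | nil => exact absurd rfl hne
  | cons h t =>
    have hhead : PySem.List.pyGetD (h :: t) 0 [] = h := by
      have := PySem.List.pyGetD_natCast (h :: t) 0 []
      simpa using this
    set n : Nat := (h :: t).length with hn
    set m : Nat := h.length with hm
    have hpre : ∀ r (hr : r < (h :: t).length),
        (∀ j (hj : j < r), (2 : Int) ∉ (h :: t)[j].take m) → m ≤ (h :: t)[r].length := by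
      simpa using hpre0
    have hscan : pvScanA (h :: t) ((m : Nat) : Int)
        (PySem.List.pyRange 0 (n : Int) 1) = pvScanB ((m : Nat) : Int) (h :: t) 0 := by
      have := scanA_eq (h :: t) m hpre n 0 (by omega) (by omega)
        (by intro j' hj' _; exact absurd hj' (by omega))
      simpa using this
    rw [solve_a65b410d, solve_a65b410d_alt]
    simp only [hhead, ← hn, ← hm]
    rw [hscan]
    rcases scanB_spec m (h :: t) 0 with ⟨hsc, _⟩ | ⟨k, hk, hsc, hcpos, hfirst⟩
    · -- no 2 anywhere: everything stays zero
      rw [hsc]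
      simp only []
      rw [PySem.List.pyRange_one_eq_nil (le_refl (0 : Int)),
        PySem.List.pyRange_one_eq_nil (by omega : (-1 : Int) + 1 ≤ 1)]
      simp only [pvFill, List.foldl_nil]
      rw [loop3_eq (-1) 0 ((n : Int) - -1 - 1).toNat 1 ((n : Int) - -1)
        (List.replicate n (List.replicate m 0)) (by omega)]
      rw [PySem.List.pyRange_one_eq_nil (by omega : min ((n : Int) - -1) 0 ≤ 1), List.foldl_nil]
      apply List.ext_getElem?
      intro i
      by_cases hi : i < n
      · rw [List.getElem?_replicate, if_pos hi,
          PySem.List.getElem?_map_pyRange_zero _ n i hi]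
        have h1 : min (max (0 + (-1 - (i : Int))) 0) (m : Int) = 0 := by omega
        rw [h1]
        simp
      · rw [List.getElem?_eq_none (by simpa using hi),
          List.getElem?_eq_none (by simp [PySem.List.length_pyRange_one]; omega)]
    · rw [hsc]
      simp only [zero_add]
      set c : Nat := List.count 2 ((h :: t)[k].take m) with hc
      have hcm : c ≤ m := le_trans List.count_le_length (List.length_take_le _ _)
      have hkn : k < n := hk
      -- loop 1: the 2-row
      have ho1 := pvFill_eq k 2 (PySem.List.pyRange 0 (c : Int) 1)
        (List.replicate n (List.replicate m 0)) (by simp [hkn])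
      have hgd : (List.replicate n (List.replicate m (0 : Int))).getD k [] = List.replicate m (0 : Int) := by
        simp [List.getD_eq_getElem?_getD, List.getElem?_replicate, hkn]
      rw [hgd, fillRow_eq 2 _ c (by simp [hcm]), List.drop_replicate] at ho1
      rw [ho1]
      set o1 : List (List Int) :=
        (List.replicate n (List.replicate m 0)).set k
          (List.replicate c 2 ++ List.replicate (m - c) 0) with ho1d
      have hlen1 : o1.length = n := by simp [ho1d]
      -- loop 2: the 3-rows above
      have W2 := fold_write 3 m (fun d => (k : Int) - d) (fun d => min ((c : Int) + d) (m : Int))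
        (PySem.List.pyRange 1 ((k : Int) + 1) 1) o1
        (by
          intro d hd
          beta_reduce
          rw [PySem.List.mem_pyRange_one] at hd
          refine ⟨by omega, by rw [hlen1]; push_cast; omega, by omega, by omega, ?_⟩
          rw [ho1d, List.getElem?_set_ne (by omega)]
          simp [List.getElem?_replicate, show ((k : Int) - d).toNat < n by omega])
        ((PySem.List.pairwise_lt_pyRange_one 1 ((k : Int) + 1)).imp (by intro a b hab; beta_reduce; omega))
      beta_reduce at W2
      set o2 : List (List Int) :=
        (PySem.List.pyRange 1 ((k : Int) + 1) 1).foldl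
          (fun o d => pvFill ((k : Int) - d) 3 o (PySem.List.pyRange 0 (min ((c : Int) + d) (m : Int)) 1)) o1 with ho2d
      have hlen2 : o2.length = n := by rw [ho2d, W2.1, hlen1]
      -- loop 3: the 1-rows below
      rw [loop3_eq (k : Int) (c : Int) ((n : Int) - (k : Int) - 1).toNat 1 ((n : Int) - (k : Int)) o2 (by omega)]
      have hbase3 : ∀ d : Int, 1 ≤ d → d < (n : Int) - (k : Int) →
          o2[((k : Int) + d).toNat]? = some (List.replicate m 0) := by
        intro d h1d h2d
        have hu := W2.2.1 ((k : Int) + d).toNat (by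
          intro d' hd'
          rw [PySem.List.mem_pyRange_one] at hd'
          push_cast
          omega)
        rw [hu, ho1d, List.getElem?_set_ne (by omega)]
        simp [List.getElem?_replicate, show ((k : Int) + d).toNat < n by omega]
      have W3 := fold_write 1 m (fun d => (k : Int) + d) (fun d => (c : Int) - d)
        (PySem.List.pyRange 1 (min ((n : Int) - (k : Int)) (c : Int)) 1) o2
        (by
          intro d hd
          beta_reduce
          rw [PySem.List.mem_pyRange_one] at hd
          refine ⟨by omega, by rw [hlen2]; push_cast; omega, by omega, by omega, ?_⟩
          exact hbase3 d (by omega) (by omega))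
        ((PySem.List.pairwise_lt_pyRange_one 1 (min ((n : Int) - (k : Int)) (c : Int))).imp
          (by intro a b hab; beta_reduce; omega))
      beta_reduce at W3
      set o3 : List (List Int) :=
        (PySem.List.pyRange 1 (min ((n : Int) - (k : Int)) (c : Int)) 1).foldl
          (fun o d => pvFill ((k : Int) + d) 1 o (PySem.List.pyRange 0 ((c : Int) - d) 1)) o2 with ho3d
      have hlen3 : o3.length = n := by rw [ho3d, W3.1, hlen2]
      -- compare row by row
      apply List.ext_getElem?
      intro i
      by_cases hi : i < n
      case neg =>
        rw [List.getElem?_eq_none (by rw [hlen3]; omega),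
          List.getElem?_eq_none (by simp [PySem.List.length_pyRange_one]; omega)]
      case pos =>
        rw [PySem.List.getElem?_map_pyRange_zero _ n i hi]
        by_cases hik : i < k
        · -- a 3-row above the 2-row
          rw [W3.2.1 i (by
            intro d hd
            rw [PySem.List.mem_pyRange_one] at hd
            push_cast
            omega)]
          have h2 := W2.2.2 ((k : Int) - (i : Int))
            (PySem.List.mem_pyRange_one.mpr ⟨by omega, by omega⟩)
          rw [show ((k : Int) - ((k : Int) - (i : Int))).toNat = i by omega] at h2
          rw [h2]
          exact row_build m ((c : Int) + ((k : Int) - (i : Int))) _ 3 _ (by push_cast; omega)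
            (by rw [if_pos (by omega : ((k : Int) - (i : Int)) > 0)])
        by_cases hik2 : i = k
        · -- the 2-row itself
          subst hik2
          rw [W3.2.1 i (by
            intro d hd
            rw [PySem.List.mem_pyRange_one] at hd
            push_cast
            omega)]
          rw [W2.2.1 i (by
            intro d hd
            rw [PySem.List.mem_pyRange_one] at hd
            push_cast
            omega)]
          rw [ho1d, List.getElem?_set_self (by simpa using hkn)]
          exact row_build m ((c : Int) + ((i : Int) - (i : Int))) _ 2 c (by push_cast; omega)
            (by rw [if_neg (by omega), if_pos (by omega)])
        by_cases hic : (i : Int) - (k : Int) < (c : Int)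
        · -- a written 1-row below the 2-row
          have h3 := W3.2.2 ((i : Int) - (k : Int))
            (PySem.List.mem_pyRange_one.mpr ⟨by omega, by push_cast; omega⟩)
          rw [show ((k : Int) + ((i : Int) - (k : Int))).toNat = i by omega] at h3
          rw [h3]
          exact row_build m ((c : Int) + ((k : Int) - (i : Int))) _ 1 _ (by push_cast; omega)
            (by rw [if_neg (by omega), if_neg (by omega)])
        · -- below the break: still all zeros
          rw [W3.2.1 i (by
            intro d hd
            rw [PySem.List.mem_pyRange_one] at hd
            push_cast
            omega)]
          rw [W2.2.1 i (by
            intro d hd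
            rw [PySem.List.mem_pyRange_one] at hd
            push_cast
            omega)]
          rw [ho1d, List.getElem?_set_ne (by omega), List.getElem?_replicate, if_pos hi]
          rw [show (List.replicate m (0 : Int))
              = List.replicate (0 : Nat) (1 : Int) ++ List.replicate (m - 0) (0 : Int) by simp]
          exact row_build m ((c : Int) + ((k : Int) - (i : Int))) _ 1 0 (by push_cast; omega)
            (by rw [if_neg (by omega), if_neg (by omega)])

-- ===== VERDICT (by name: the statement is the Claim_ definition above) =====
theorem solve_a65b410d_spec : Claim_equal_solve_a65b410d := by
  intro grid _ hpre
  exact AB_eq grid hpre.1 hpre.2
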